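-- pv_equiv track=rewrite | github.com/cutehammond772/problem-solving-archive | 백준/Gold/17954. 투튜브/투튜브.py | solve
-- ===== SOURCE A (Python) =====
-- def solve(N):
-- 	if N == 1:
-- 		return 2, [[1], [2]]
--
-- 	T = N * 2
--
-- 	# Example (N = 5)
-- 	# 7 / (654 / 8)
-- 	# 9 / (321 / 10)
--
-- 	R = N - 2
-- 	R1, R2 = 1, (T - 4) // 2 + 1
--
-- 	A1, B1 = [T - 3], [T - 1]
-- 	A2, B2 = [*range(R2, R2 + R)][::-1], [*range(R1, R1 + R)][::-1]
-- 	A3, B3 = [T - 2], [T]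
--
-- 	rot = 0
-- 	arr = [A1 + A2 + A3, B1 + B2 + B3]
--
-- 	# 사과가 나오는 순서이다.
-- 	order = A1 + A2 + A3 + B1 + B2 + B3
-- 	accu = sum(order)
--
-- 	for t in range(2 * N):
-- 		rot += accu * t
-- 		accu -= order[t]
--
-- 	return rot, arr
-- ===== SOURCE B (Python) =====
-- def solve(N):
--     if N == 1:
--         return 2, [[1], [2]]
--     top = [2 * N - 3] + list(range(2 * N - 4, N - 2, -1)) + [2 * N - 2]
--     bottom = [2 * N - 1] + list(range(N - 2, 0, -1)) + [2 * N]
--     rot = sum(v * (i * (i + 1) // 2) for i, v in enumerate(top + bottom))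
--     return rot, [top, bottom]
-- ===== Notes on version B (the rewrite author's own statement) =====
-- stated objective: alternative
-- what changed: B builds the two rows as direct descending ranges (no floordiv midpoint, no reversal of ascending ranges) and replaces A's mutable suffix-sum accumulator loop for rot by a direct closed-form weighted sum (Abel summation: rot = sum of order[i] * i*(i+1)//2).
-- outside the precondition, e.g. on solve(0): A returns (0, [[-3, -2], [-1, 0]]), B returns (-5, [[-3, -2], [-1, 0]])
import Mathlib
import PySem

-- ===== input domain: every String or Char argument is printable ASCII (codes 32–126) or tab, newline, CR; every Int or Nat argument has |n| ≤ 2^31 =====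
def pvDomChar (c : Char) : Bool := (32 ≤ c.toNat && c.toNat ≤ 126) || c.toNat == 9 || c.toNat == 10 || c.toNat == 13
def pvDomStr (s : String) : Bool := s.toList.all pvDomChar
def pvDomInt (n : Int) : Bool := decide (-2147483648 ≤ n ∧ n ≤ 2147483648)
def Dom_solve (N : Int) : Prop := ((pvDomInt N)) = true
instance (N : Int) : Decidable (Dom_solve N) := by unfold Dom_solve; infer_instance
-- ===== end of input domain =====

-- B replaces A's suffix-sum accumulator loop by a direct closed-form weighted sum and builds
-- the rows as direct descending ranges; same algorithmic cost (objective: alternative).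

-- ===== PORT A =====
def solve (N : Int) : Int × List (List Int) :=
  if N = 1 then (2, [[1], [2]])
  else
    let T := N * 2
    let R := N - 2
    let R1 : Int := 1
    let R2 : Int := PySem.Int.floordiv (T - 4) 2 + 1
    let A1 := [T - 3]
    let B1 := [T - 1]
    let A2 := (PySem.List.slice? (PySem.List.pyRange R2 (R2 + R) 1) none none (-1)).getD []
    let B2 := (PySem.List.slice? (PySem.List.pyRange R1 (R1 + R) 1) none none (-1)).getD []
    let A3 := [T - 2]
    let B3 := [T]
    let arr := [A1 ++ A2 ++ A3, B1 ++ B2 ++ B3]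
    let order := A1 ++ A2 ++ A3 ++ (B1 ++ B2 ++ B3)
    let accu := order.sum
    let res := (PySem.List.pyRange 0 (2 * N) 1).foldl
      (fun (p : Int × Int) t => (p.1 + p.2 * t, p.2 - PySem.List.pyGetD order t 0)) (0, accu)
    (res.1, arr)

-- ===== PORT B =====
def solve_alt (N : Int) : Int × List (List Int) :=
  if N = 1 then (2, [[1], [2]])
  else
    let top := [2 * N - 3] ++ PySem.List.pyRange (2 * N - 4) (N - 2) (-1) ++ [2 * N - 2]
    let bottom := [2 * N - 1] ++ PySem.List.pyRange (N - 2) 0 (-1) ++ [2 * N]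
    let rot := ((PySem.List.enumerate (top ++ bottom) 0).map
      (fun p => p.2 * PySem.Int.floordiv (p.1 * (p.1 + 1)) 2)).sum
    (rot, [top, bottom])

-- ===== PRECONDITION & SPEC =====
-- Pre_ restricts to the problem's natural domain of positive N (a count of apples); for
-- non-positive N A still returns, but its value is an accident of the empty range(2*N) loop.
def Pre_solve (N : Int) : Prop := 1 ≤ N
instance (N : Int) : Decidable (Pre_solve N) := by unfold Pre_solve; infer_instance
def pvWitness_solve : Int := (3)
def Spec_solve (N : Int) (out : Int × List (List Int)) : Prop := out = solve_alt N
instance (N : Int) (out : Int × List (List Int)) : Decidable (Spec_solve N out) := by unfold Spec_solve; infer_instance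

-- ===== CLAIM (what is proved, stated in full; the proofs are below) =====
def Claim_equal_solve : Prop := ∀ (N : Int), Dom_solve N → Pre_solve N → Spec_solve N (solve N)

-- ===== LEMMAS AND PROOFS =====

-- tri m = m*(m+1) // 2 (Python floor division), the weight of order[m] in rot
def tri (m : Int) : Int := PySem.Int.floordiv (m * (m + 1)) 2

lemma tri_sub_one (m : Int) : tri m = tri (m - 1) + m := by
  unfold tri
  rw [PySem.Int.floordiv_eq_ediv_of_pos (by norm_num), PySem.Int.floordiv_eq_ediv_of_pos (by norm_num)]
  rw [show m * (m + 1) = (m - 1) * m + m * 2 by ring]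
  rw [Int.add_mul_ediv_right _ _ (by norm_num)]
  rw [show (m - 1) * (m - 1 + 1) = (m - 1) * m by ring]

-- the value A's loop adds to rot, as a recursion over the remaining suffix l of order,
-- a being the current loop index
def Wspec (a : Int) (l : List Int) : Int :=
  match l with
  | [] => 0
  | x :: xs => a * (x :: xs).sum + Wspec (a + 1) xs

lemma A_loop (l : List Int) : ∀ (L : List Int) (k : Nat) (rot : Int), L.drop k = l →
    ((PySem.List.pyRange (k : Int) ((k : Int) + l.length) 1).foldl
      (fun (p : Int × Int) t => (p.1 + p.2 * t, p.2 - PySem.List.pyGetD L t 0)) (rot, l.sum)).1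
    = rot + Wspec (k : Int) l := by
  induction l with
  | nil =>
    intro L k rot _
    rw [PySem.List.pyRange_one_eq_nil (by simp)]
    simp [Wspec]
  | cons x xs ih =>
    intro L k rot hdrop
    have hget : PySem.List.pyGetD L (k : Int) 0 = x := by
      rw [PySem.List.pyGetD_natCast]
      have h0 : L[k]? = some x := by
        have h := congrArg (fun l => l[0]?) hdrop
        simpa [List.getElem?_drop] using h
      simp [List.getD, h0]
    have hdrop' : L.drop (k + 1) = xs := by
      have : L.drop (k + 1) = (L.drop k).drop 1 := by
        rw [List.drop_drop]
      rw [this, hdrop]; rfl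
    rw [PySem.List.pyRange_one_cons (by simp)]
    rw [List.foldl_cons]
    have hsum : (x :: xs).sum - PySem.List.pyGetD L (k : Int) 0 = xs.sum := by
      rw [hget]; simp
    have hcast1 : ((k : Int) + 1) = ((k + 1 : Nat) : Int) := by push_cast; ring
    have hcast2 : ((k : Int) + (x :: xs).length) = (((k + 1 : Nat)) : Int) + (xs.length : Int) := by
      push_cast [List.length_cons]; ring
    simp only [hsum, hcast1, hcast2]
    rw [ih L (k + 1) (rot + (x :: xs).sum * (k : Int)) hdrop']
    show _ = rot + ((k : Int) * (x :: xs).sum + Wspec ((k : Int) + 1) xs)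
    rw [hcast1]; ring

lemma sum_map_enum_shift (xs : List Int) : ∀ (s : Int) (g h : Int → Int) (c : Int),
    (∀ i, h i = g i + c) →
    ((PySem.List.enumerate xs s).map (fun p => p.2 * h p.1)).sum
      = ((PySem.List.enumerate xs s).map (fun p => p.2 * g p.1)).sum + c * xs.sum := by
  induction xs with
  | nil => intro s g h c _; simp
  | cons x xs ih =>
    intro s g h c hpt
    rw [PySem.List.enumerate_cons]
    simp only [List.map_cons, List.sum_cons]
    rw [ih (s + 1) g h c hpt, hpt s]
    ring

lemma Wspec_closed (l : List Int) : ∀ (a s : Int),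
    Wspec a l = ((PySem.List.enumerate l s).map
      (fun p => p.2 * (a * (p.1 - s + 1) + tri (p.1 - s)))).sum := by
  induction l with
  | nil => intro a s; simp [Wspec]
  | cons x xs ih =>
    intro a s
    rw [PySem.List.enumerate_cons, List.map_cons, List.sum_cons]
    have htri0 : tri 0 = 0 := by decide
    have hterm : x * (a * (s - s + 1) + tri (s - s)) = x * a := by
      simp [htri0]
    rw [hterm]
    show a * (x :: xs).sum + Wspec (a + 1) xs = _
    rw [ih (a + 1) (s + 1)]
    rw [sum_map_enum_shift xs (s + 1)
      (fun i => (a + 1) * (i - (s + 1) + 1) + tri (i - (s + 1)))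
      (fun i => a * (i - s + 1) + tri (i - s)) a
      (by
        intro i
        have htri := tri_sub_one (i - s)
        rw [show i - s - 1 = i - (s + 1) by ring] at htri
        show a * (i - s + 1) + tri (i - s)
          = ((a + 1) * (i - (s + 1) + 1) + tri (i - (s + 1))) + a
        rw [htri]; ring)]
    simp only [List.sum_cons]
    ring

lemma floordiv_even (N : Int) : PySem.Int.floordiv (N * 2 - 4) 2 + 1 = N - 1 := by
  rw [PySem.Int.floordiv_eq_ediv_of_pos (by norm_num)]
  omega

-- ===== VERDICT (by name: the statement is the Claim_ definition above) =====
theorem solve_spec : Claim_equal_solve := by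
  intro N _ hpre
  unfold Spec_solve
  by_cases h1 : N = 1
  · simp [solve, solve_alt, h1]
  · have h2 : 2 ≤ N := by unfold Pre_solve at hpre; omega
    unfold solve solve_alt
    rw [if_neg h1, if_neg h1]
    -- rows
    have hA2 : (PySem.List.slice? (PySem.List.pyRange (PySem.Int.floordiv (N * 2 - 4) 2 + 1)
        (PySem.Int.floordiv (N * 2 - 4) 2 + 1 + (N - 2)) 1) none none (-1)).getD []
        = PySem.List.pyRange (2 * N - 4) (N - 2) (-1) := by
      rw [floordiv_even, PySem.List.slice?_none_none_neg_one, PySem.List.pyRange_neg_one_eq_reverse]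
      simp
      congr 1
      · ring
      · ring
    have hB2 : (PySem.List.slice? (PySem.List.pyRange 1 (1 + (N - 2)) 1) none none (-1)).getD []
        = PySem.List.pyRange (N - 2) 0 (-1) := by
      rw [PySem.List.slice?_none_none_neg_one, PySem.List.pyRange_neg_one_eq_reverse]
      simp
      congr 1
      ring
    simp only [hA2, hB2]
    rw [show N * 2 - 3 = 2 * N - 3 by ring, show N * 2 - 1 = 2 * N - 1 by ring,
        show N * 2 - 2 = 2 * N - 2 by ring, show N * 2 = 2 * N by ring]
    set order := ([2 * N - 3] ++ PySem.List.pyRange (2 * N - 4) (N - 2) (-1) ++ [2 * N - 2]) ++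
      ([2 * N - 1] ++ PySem.List.pyRange (N - 2) 0 (-1) ++ [2 * N]) with horder
    have hlen : ((order.length : Nat) : Int) = 2 * N := by
      simp [horder, PySem.List.length_pyRange_neg_one]
      omega
    have hloop := A_loop order order 0 0 rfl
    norm_num at hloop
    congr 1
    rw [← hlen, hloop, Wspec_closed order 0 0]
    simp [tri]
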